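-- pv_equiv track=rewrite | github.com/synaptent/RingRift | ai-service/app/coordination/integration_bridge.py | _infer_version_from_model_id
-- ===== SOURCE A (Python) =====
-- def _infer_version_from_model_id(model_id: str | None) -> int | None:
--     if not model_id:
--         return None
--     for token in (":v", "_v", "-v"):
--         if token in model_id:
--             suffix = model_id.rsplit(token, 1)[-1]
--             if suffix.isdigit():
--                 return int(suffix)
--     return None
-- ===== SOURCE B (Python) =====
-- def _infer_version_from_model_id(model_id):
--     # Scan from the end: take the maximal trailing digit run, then check the
--     # two characters just before it are a separator (':', '_' or '-') plus 'v'.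
--     if not model_id:
--         return None
--     n = len(model_id)
--     i = n
--     while i > 0 and model_id[i - 1].isdigit():
--         i -= 1
--     if i == n or i < 2:
--         return None
--     if model_id[i - 1] == 'v' and model_id[i - 2] in (':', '_', '-'):
--         return int(model_id[i:])
--     return None
-- ===== Notes on version B (the rewrite author's own statement) =====
-- stated objective: alternative
-- what changed: Replaces the token-membership + rsplit search over the three tokens by a single backwards character scan collecting the maximal trailing digit run and checking the two characters before it.
import Mathlib
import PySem

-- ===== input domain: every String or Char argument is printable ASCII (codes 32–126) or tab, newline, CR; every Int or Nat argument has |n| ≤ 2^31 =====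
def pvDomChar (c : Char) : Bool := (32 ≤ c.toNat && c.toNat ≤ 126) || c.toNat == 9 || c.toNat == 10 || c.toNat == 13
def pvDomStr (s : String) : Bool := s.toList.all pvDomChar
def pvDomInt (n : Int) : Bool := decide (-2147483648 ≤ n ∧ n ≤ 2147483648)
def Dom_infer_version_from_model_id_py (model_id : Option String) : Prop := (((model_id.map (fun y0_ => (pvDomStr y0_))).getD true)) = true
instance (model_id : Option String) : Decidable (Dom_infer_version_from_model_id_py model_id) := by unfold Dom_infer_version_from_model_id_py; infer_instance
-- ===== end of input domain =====

-- B replaces A's token-membership + rsplit search by one backwards character scan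
-- of the maximal trailing digit run (objective: alternative decomposition).


-- ===== PORT A =====
-- hand port of `model_id.rsplit(token, 1)[-1]`: the suffix after the LAST
-- occurrence of `tok` (none when `tok` does not occur); exact whenever A uses it,
-- i.e. under the guard `token in model_id`.
def pvAfterLast (tok : List Char) : List Char → Option (List Char)
  | [] => none
  | c :: rest =>
    match pvAfterLast tok rest with
    | some t => some t
    | none => if tok <+: (c :: rest) then some ((c :: rest).drop tok.length) else none

-- the `for token in (":v", "_v", "-v")` loop of A
def pvLoopA (cs : List Char) : List (List Char) → Option Int
  | [] => none
  | tok :: toks =>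
    if PySem.Chars.isIn tok cs then
      let suffix := (pvAfterLast tok cs).getD []
      if PySem.Chars.strIsdigit suffix then
        -- int(suffix): exact here, suffix is nonempty ASCII digits
        some ((PySem.Int.ofChars? suffix).getD 0)
      else pvLoopA cs toks
    else pvLoopA cs toks

def infer_version_from_model_id_py (model_id : Option String) : Option Int :=
  match model_id with
  | none => none
  | some s =>
    if s.toList = [] then none
    else pvLoopA s.toList [[':', 'v'], ['_', 'v'], ['-', 'v']]

-- ===== PORT B =====
-- the backwards scan of Source B: the index loop `while i > 0 and s[i-1].isdigit()`
-- is the span of the reversed character list ('run' = reversed s[i:], 'rest' =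
-- reversed s[:i]); 'i == n' = empty run, 'i < 2' = rest shorter than 2
def pvScanB (cs : List Char) : Option Int :=
  let run := cs.reverse.takeWhile PySem.Chars.isdigit
  let rest := cs.reverse.dropWhile PySem.Chars.isdigit
  if run = [] ∨ rest.length < 2 then none
  else if rest.head? = some 'v' ∧
      (rest[1]? = some ':' ∨ rest[1]? = some '_' ∨ rest[1]? = some '-') then
    -- int(model_id[i:]): exact here, the run is nonempty ASCII digits
    some ((PySem.Int.ofChars? run.reverse).getD 0)
  else none

def infer_version_from_model_id_py_alt (model_id : Option String) : Option Int :=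
  match model_id with
  | none => none
  | some s =>
    if s.toList = [] then none
    else pvScanB s.toList

-- ===== PRECONDITION & SPEC =====
def Spec_infer_version_from_model_id_py (model_id : Option String) (out : Option Int) : Prop := out = infer_version_from_model_id_py_alt model_id
instance (model_id : Option String) (out : Option Int) : Decidable (Spec_infer_version_from_model_id_py model_id out) := by unfold Spec_infer_version_from_model_id_py; infer_instance

-- ===== CLAIM (what is proved, stated in full; the proofs are below) =====
def Claim_equal_infer_version_from_model_id_py : Prop := ∀ (model_id : Option String), Dom_infer_version_from_model_id_py model_id → Spec_infer_version_from_model_id_py model_id (infer_version_from_model_id_py model_id)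

-- ===== LEMMAS AND PROOFS =====

def pvIsSep (c : Char) : Prop := c = ':' ∨ c = '_' ∨ c = '-'

theorem pvAfterLast_none (tok : List Char) (htok : tok ≠ []) :
    ∀ cs : List Char, pvAfterLast tok cs = none → ¬ tok <:+: cs := by
  intro cs
  induction cs with
  | nil =>
    intro _ hin
    exact htok (List.eq_nil_of_infix_nil hin)
  | cons c rest ih =>
    intro h hin
    simp only [pvAfterLast] at h
    cases hrest : pvAfterLast tok rest with
    | some t => rw [hrest] at h; simp at h
    | none =>
      rw [hrest] at h
      simp only at h
      rcases List.infix_cons_iff.mp hin with h1 | h2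
      · rw [if_pos h1] at h; simp at h
      · exact ih hrest h2

theorem pvAfterLast_some (tok : List Char) :
    ∀ cs t : List Char, pvAfterLast tok cs = some t → ∃ p, cs = p ++ tok ++ t := by
  intro cs
  induction cs with
  | nil => intro t h; simp [pvAfterLast] at h
  | cons c rest ih =>
    intro t h
    simp only [pvAfterLast] at h
    cases hrest : pvAfterLast tok rest with
    | some t' =>
      rw [hrest] at h
      simp only [Option.some.injEq] at h
      subst h
      obtain ⟨p, hp⟩ := ih _ hrest
      exact ⟨c :: p, by simp [hp]⟩
    | none =>
      rw [hrest] at h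
      simp only at h
      by_cases hp : tok <+: (c :: rest)
      · rw [if_pos hp] at h
        simp only [Option.some.injEq] at h
        obtain ⟨q, hq⟩ := hp
        refine ⟨[], ?_⟩
        rw [← h, List.nil_append, ← hq, List.drop_left]
      · rw [if_neg hp] at h; simp at h

theorem pvAfterLast_shape (a : Char) (tk t : List Char)
    (h : ¬ (a :: tk) <:+: (tk ++ t)) :
    ∀ p : List Char, pvAfterLast (a :: tk) (p ++ a :: tk ++ t) = some t := by
  intro p
  induction p with
  | nil =>
    have hcons : ([] : List Char) ++ a :: tk ++ t = a :: (tk ++ t) := by simp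
    rw [hcons]
    simp only [pvAfterLast]
    cases hr : pvAfterLast (a :: tk) (tk ++ t) with
    | some t' =>
      obtain ⟨p', hp'⟩ := pvAfterLast_some _ _ _ hr
      exact absurd ⟨p', t', hp'.symm⟩ h
    | none =>
      have hpre : (a :: tk) <+: a :: (tk ++ t) := ⟨t, by simp⟩
      rw [if_pos hpre]
      have : a :: (tk ++ t) = (a :: tk) ++ t := by simp
      rw [this, List.drop_left]
  | cons c p' ih =>
    have : (c :: p') ++ a :: tk ++ t = c :: (p' ++ a :: tk ++ t) := by simp
    rw [this]
    simp only [pvAfterLast]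
    rw [ih]

theorem pvSep_not_infix (c : Char) (hc : pvIsSep c) (t : List Char)
    (ht : ∀ x ∈ t, PySem.Chars.isdigit x = true) :
    ¬ [c, 'v'] <:+: ('v' :: t) := by
  intro hin
  have hmem : c ∈ 'v' :: t := hin.subset (by simp)
  rcases List.mem_cons.mp hmem with h | h
  · rcases hc with rfl | rfl | rfl <;> simp at h
  · have := ht c h
    rcases hc with rfl | rfl | rfl <;> simp [PySem.Chars.isdigit] at this

theorem pvSpan_shape (p t : List Char) (c : Char)
    (ht : ∀ x ∈ t, PySem.Chars.isdigit x = true) (hc : PySem.Chars.isdigit c = false) :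
    (t ++ c :: p).takeWhile PySem.Chars.isdigit = t ∧
    (t ++ c :: p).dropWhile PySem.Chars.isdigit = c :: p := by
  have h1 : t.takeWhile PySem.Chars.isdigit = t := List.takeWhile_eq_self_iff.mpr ht
  have h2 : t.dropWhile PySem.Chars.isdigit = [] := List.dropWhile_eq_nil_iff.mpr ht
  constructor
  · rw [List.takeWhile_append, h1]; simp [hc]
  · rw [List.dropWhile_append, h2]; simp [hc]

theorem pvStrIsdigit_intro (t : List Char) (h1 : t ≠ [])
    (h2 : ∀ x ∈ t, PySem.Chars.isdigit x = true) : PySem.Chars.strIsdigit t = true := by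
  simp only [PySem.Chars.strIsdigit, Bool.and_eq_true]
  constructor
  · simpa using h1
  · simpa using h2

-- B's scan fires on a string of shape  p ++ sep :: 'v' :: digits⁺
theorem pvScanB_fire (p t : List Char) (c : Char) (hc : pvIsSep c)
    (ht : PySem.Chars.strIsdigit t = true) :
    pvScanB (p ++ c :: 'v' :: t) = some ((PySem.Int.ofChars? t).getD 0) := by
  simp only [PySem.Chars.strIsdigit, Bool.and_eq_true] at ht
  have htne : t ≠ [] := by simpa using ht.1
  have htall : ∀ x ∈ t, PySem.Chars.isdigit x = true := by simpa using ht.2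
  have hrev : (p ++ c :: 'v' :: t).reverse = t.reverse ++ 'v' :: (c :: p.reverse) := by simp
  have hspan := pvSpan_shape (c :: p.reverse) t.reverse 'v'
    (fun x hx => htall x (List.mem_reverse.mp hx)) (by simp [PySem.Chars.isdigit])
  have hrne : t.reverse ≠ [] := by simpa using htne
  unfold pvScanB
  rw [hrev, hspan.1, hspan.2]
  rw [if_neg (by simp [hrne])]
  rw [if_pos (by rcases hc with rfl | rfl | rfl <;> simp)]
  rw [List.reverse_reverse]

theorem pvScanB_eq_none (cs : List Char)
    (h : ∀ c : Char, pvIsSep c →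
      PySem.Chars.isIn [c, 'v'] cs = true →
      PySem.Chars.strIsdigit ((pvAfterLast [c, 'v'] cs).getD []) = true → False) :
    pvScanB cs = none := by
  cases hrun : cs.reverse.takeWhile PySem.Chars.isdigit with
  | nil => unfold pvScanB; rw [hrun, if_pos (Or.inl rfl)]
  | cons r0 rr =>
    cases hrest : cs.reverse.dropWhile PySem.Chars.isdigit with
    | nil => unfold pvScanB; rw [hrun, hrest, if_pos (by simp)]
    | cons d ds =>
      cases ds with
      | nil => unfold pvScanB; rw [hrun, hrest, if_pos (by simp)]
      | cons c p' =>
        by_cases hcond : d = 'v' ∧ (c = ':' ∨ c = '_' ∨ c = '-')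
        · exfalso
          obtain ⟨rfl, hsep⟩ := hcond
          have hcs : cs = p'.reverse ++ c :: 'v' :: (r0 :: rr).reverse := by
            have hsplit := List.takeWhile_append_dropWhile
              (p := PySem.Chars.isdigit) (l := cs.reverse)
            rw [hrun, hrest] at hsplit
            have : cs = cs.reverse.reverse := (List.reverse_reverse cs).symm
            rw [this, ← hsplit]
            simp
          set t := (r0 :: rr).reverse with htdef
          have htall : ∀ x ∈ t, PySem.Chars.isdigit x = true := by
            intro x hx
            have hx' : x ∈ r0 :: rr := List.mem_reverse.mp hx
            exact List.mem_takeWhile_imp (hrun ▸ hx')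
          have hinf : [c, 'v'] <:+: cs := ⟨p'.reverse, t, by rw [hcs]; simp⟩
          have hiin : PySem.Chars.isIn [c, 'v'] cs = true :=
            (PySem.Chars.isIn_iff_infix _ _).mpr hinf
          have hal : pvAfterLast [c, 'v'] cs = some t := by
            have := pvAfterLast_shape c ['v'] t (pvSep_not_infix c hsep t htall) p'.reverse
            rw [hcs]
            simpa using this
          refine h c hsep hiin ?_
          rw [hal]
          exact pvStrIsdigit_intro t (by simp [htdef]) htall
        · unfold pvScanB
          rw [hrun, hrest, if_neg (by simp)]
          rw [if_neg (by simpa using hcond)]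

-- one step of A's token loop, as a single conjunction-guarded if
theorem pvLoopA_step (cs tok : List Char) (toks : List (List Char)) :
    pvLoopA cs (tok :: toks) =
      if PySem.Chars.isIn tok cs = true ∧
          PySem.Chars.strIsdigit ((pvAfterLast tok cs).getD []) = true then
        some ((PySem.Int.ofChars? ((pvAfterLast tok cs).getD [])).getD 0)
      else pvLoopA cs toks := by
  simp only [pvLoopA]
  by_cases h1 : PySem.Chars.isIn tok cs = true
  · by_cases h2 : PySem.Chars.strIsdigit ((pvAfterLast tok cs).getD []) = true
    · rw [if_pos h1, if_pos h2, if_pos ⟨h1, h2⟩]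
    · rw [if_pos h1, if_neg h2, if_neg (by tauto)]
  · rw [if_neg h1, if_neg (by tauto)]

-- main list-level equivalence
theorem pvMain (cs : List Char) :
    pvLoopA cs [[':', 'v'], ['_', 'v'], ['-', 'v']] = pvScanB cs := by
  have hfire : ∀ c : Char, pvIsSep c →
      PySem.Chars.isIn [c, 'v'] cs = true →
      PySem.Chars.strIsdigit ((pvAfterLast [c, 'v'] cs).getD []) = true →
      pvScanB cs = some ((PySem.Int.ofChars? ((pvAfterLast [c, 'v'] cs).getD [])).getD 0) := by
    intro c hc hin hd
    cases hal : pvAfterLast [c, 'v'] cs with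
    | none =>
      exact absurd ((PySem.Chars.isIn_iff_infix _ _).mp hin)
        (pvAfterLast_none _ (by simp) cs hal)
    | some t =>
      rw [hal] at hd
      simp only [Option.getD_some] at hd ⊢
      obtain ⟨p, hp⟩ := pvAfterLast_some _ cs t hal
      rw [hp]
      have halign : p ++ [c, 'v'] ++ t = p ++ c :: 'v' :: t := by simp
      rw [halign]
      exact pvScanB_fire p t c hc hd
  rw [pvLoopA_step, pvLoopA_step, pvLoopA_step]
  split_ifs with h1 h2 h3
  · exact (hfire ':' (Or.inl rfl) h1.1 h1.2).symm
  · exact (hfire '_' (Or.inr (Or.inl rfl)) h2.1 h2.2).symm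
  · exact (hfire '-' (Or.inr (Or.inr rfl)) h3.1 h3.2).symm
  · simp only [pvLoopA]
    refine (pvScanB_eq_none cs ?_).symm
    intro c hc hin hd
    rcases hc with rfl | rfl | rfl
    · exact h1 ⟨hin, hd⟩
    · exact h2 ⟨hin, hd⟩
    · exact h3 ⟨hin, hd⟩

-- ===== VERDICT (by name: the statement is the Claim_ definition above) =====
theorem infer_version_from_model_id_py_spec : Claim_equal_infer_version_from_model_id_py := by
  intro model_id _
  unfold Spec_infer_version_from_model_id_py
  cases model_id with
  | none => rfl
  | some s =>
    simp only [infer_version_from_model_id_py, infer_version_from_model_id_py_alt]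
    split_ifs with h
    · rfl
    · exact pvMain s.toList
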